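-- pv_equiv track=rewrite | github.com/khs990704/Coding-Test | 프로그래머스/1/135808. 과일 장수/과일 장수.py | solution
-- ===== SOURCE A (Python) =====
-- def solution(k, m, score):
--     answer = 0
--     score = list(sorted(score))
--     for i in range(len(score)//m):
--         box = []
--         box = score[-m:]
--         del score[-m:]
--         answer += min(box) * m
--     return answer
-- ===== SOURCE B (Python) =====
-- def solution(k, m, score):
--     s = sorted(score, reverse=True)
--     return m * sum(s[j * m - 1] for j in range(1, len(score) // m + 1))
-- ===== Notes on version B (the rewrite author's own statement) =====
-- stated objective: simpler
-- what changed: Sorts descending once and reads each box's minimum directly at stride index j*m-1, replacing A's per-box slice, min() scan and in-place deletion loop with a single strided sum.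
import Mathlib
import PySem

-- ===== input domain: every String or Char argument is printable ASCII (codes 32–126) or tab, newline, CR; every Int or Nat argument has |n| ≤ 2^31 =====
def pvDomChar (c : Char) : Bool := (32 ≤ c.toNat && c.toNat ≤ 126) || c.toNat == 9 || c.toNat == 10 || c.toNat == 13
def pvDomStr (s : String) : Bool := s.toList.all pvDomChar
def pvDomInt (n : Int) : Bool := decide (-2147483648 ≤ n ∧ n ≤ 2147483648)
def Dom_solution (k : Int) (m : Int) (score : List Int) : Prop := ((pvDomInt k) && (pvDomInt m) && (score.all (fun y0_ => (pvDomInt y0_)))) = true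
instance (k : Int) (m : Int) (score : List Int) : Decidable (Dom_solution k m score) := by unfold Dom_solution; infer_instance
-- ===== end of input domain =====

-- B replaces A's per-box slice/min()/delete loop with one strided sum over the descending sort (simpler decomposition, same asymptotics).

-- ===== PORT A =====
-- one loop iteration: box = score[-m:]; del score[-m:]; answer += min(box) * m
-- (min([]) would raise ValueError in Python; under Pre_ (m ≠ 0) the box is never empty, so the .getD 0 default is unreachable)
def solution (k : Int) (m : Int) (score : List Int) : Int :=
  let score := PySem.List.sorted score (fun x => x) false
  let st := (PySem.List.pyRange 0 (PySem.Int.floordiv (score.length : Int) m) 1).foldl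
    (fun (st : Int × List Int) _i =>
      let box := PySem.List.slice st.2 (some (-m)) none
      (st.1 + (PySem.List.min? box (fun x => x)).getD 0 * m,
       PySem.List.slice st.2 none (some (-m))))
    (0, score)
  st.1

-- ===== PORT B =====
-- s[j*m-1] is always in range for the j of the loop (m ≠ 0 under Pre_), so the .getD 0 default is unreachable
def solution_alt (k : Int) (m : Int) (score : List Int) : Int :=
  let s := PySem.List.sorted score (fun x => x) true
  m * (PySem.List.pyRange 1 (PySem.Int.floordiv (score.length : Int) m + 1) 1).foldl
      (fun acc j => acc + (PySem.List.pyGet? s (j * m - 1)).getD 0) 0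

-- ===== PRECONDITION & SPEC =====
-- Pre_ excludes exactly m = 0, where Python's len(score)//m raises ZeroDivisionError (in both A and B).
def Pre_solution (k : Int) (m : Int) (score : List Int) : Prop := m ≠ 0
instance (k : Int) (m : Int) (score : List Int) : Decidable (Pre_solution k m score) := by unfold Pre_solution; infer_instance
def pvWitness_solution : Int × Int × List Int := (4, 3, [1, 2, 3, 1, 2, 3, 1])

def Spec_solution (k : Int) (m : Int) (score : List Int) (out : Int) : Prop := out = solution_alt k m score
instance (k : Int) (m : Int) (score : List Int) (out : Int) : Decidable (Spec_solution k m score out) := by unfold Spec_solution; infer_instance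

-- ===== CLAIM (what is proved, stated in full; the proofs are below) =====
def Claim_equal_solution : Prop := ∀ (k : Int) (m : Int) (score : List Int), Dom_solution k m score → Pre_solution k m score → Spec_solution k m score (solution k m score)


-- ===== LEMMAS AND PROOFS =====

-- floor division of a nonneg by a negative is nonpositive
theorem pvFdivNonpos (a b : Int) (ha : 0 ≤ a) (hb : b < 0) : a.fdiv b ≤ 0 := by
  have h2 : 0 ≤ a / (-b) := Int.ediv_nonneg ha (by omega)
  have h3 : a / (-b) = -(a / b) := Int.ediv_neg a b ▸ by omega
  have h1 : a / b ≤ 0 := by omega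
  rw [Int.fdiv_eq_ediv]; split_ifs <;> omega

-- min-fold over a list everything of which is ≥ the accumulator
theorem pvFoldlMin (t : List Int) (x : Int) (h : ∀ y ∈ t, x ≤ y) : t.foldl min x = x := by
  induction t generalizing x with
  | nil => rfl
  | cons a t ih =>
    simp only [List.foldl_cons]
    rw [min_eq_left (h a (by simp))]
    exact ih x (fun y hy => h y (by simp [hy]))

-- an index-ignoring foldl is function iteration
theorem pvFoldlIter {s b : Type} (F : s -> s) (l : List b) (st : s) :
    l.foldl (fun acc _ => F acc) st = F^[l.length] st := by
  induction l generalizing st with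
  | nil => rfl
  | cons a l ih => simp [List.foldl_cons, ih, Function.iterate_succ_apply]

-- one iteration of A's loop body
def pvStep (m : Int) (st : Int × List Int) : Int × List Int :=
  (st.1 + (PySem.List.min? (PySem.List.slice st.2 (some (-m)) none) (fun x => x)).getD 0 * m,
   PySem.List.slice st.2 none (some (-m)))

theorem pvSolutionIter (k m : Int) (score : List Int) :
    solution k m score =
      ((pvStep m)^[(PySem.Int.floordiv (((PySem.List.sorted score (fun x => x) false).length : Int)) m).toNat]
        (0, PySem.List.sorted score (fun x => x) false)).1 := by
  simp only [solution]
  rw [show (fun (st : Int × List Int) (_i : Int) =>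
        (st.1 + (PySem.List.min? (PySem.List.slice st.2 (some (-m)) none) (fun x => x)).getD 0 * m,
         PySem.List.slice st.2 none (some (-m)))) = (fun st _ => pvStep m st) from rfl]
  rw [pvFoldlIter (pvStep m), PySem.List.length_pyRange_one]
  norm_num

-- value of c iterations of A's loop on a sorted list with at least c full boxes
theorem pvIterA (mn : Nat) (hmn : 0 < mn) :
    ∀ (c : Nat) (t : List Int) (ans : Int),
      List.Pairwise (· ≤ ·) t → c * mn ≤ t.length →
      ((pvStep (mn : Int))^[c] (ans, t)).1
        = ans + (mn : Int) * (((List.range c).map (fun j => (t.getD (t.length - (j+1)*mn) 0 : Int))).sum) := by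
  intro c
  induction c with
  | zero => intro t ans _ _; simp
  | succ c ih =>
    intro t ans hsorted hlen
    rw [Nat.succ_mul] at hlen
    have hcm : 0 < mn := hmn
    have hidx : t.length - mn < t.length := by
      have : mn ≤ t.length := by nlinarith
      omega
    have hbox : PySem.List.slice t (some (-(mn:Int))) none = t.drop (t.length - mn) :=
      PySem.List.slice_from_neg_natCast t mn hmn
    have htk : PySem.List.slice t none (some (-(mn:Int))) = t.take (t.length - mn) :=
      PySem.List.slice_to_neg_natCast t mn hmn
    have hdropc : t.drop (t.length - mn) = t[t.length - mn] :: t.drop (t.length - mn + 1) :=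
      List.drop_eq_getElem_cons hidx
    have hmin : PySem.List.min? (t.drop (t.length - mn)) (fun x => x) = some (t[t.length - mn]) := by
      rw [hdropc, PySem.List.min?_id_cons]
      congr 1
      apply pvFoldlMin
      intro y hy
      have hp : List.Pairwise (fun a b : Int => a ≤ b) (t.drop (t.length - mn)) := hsorted.drop
      rw [hdropc] at hp
      exact (List.pairwise_cons.mp hp).1 y hy
    have hstep : pvStep (mn:Int) (ans, t) = (ans + t[t.length - mn] * mn, t.take (t.length - mn)) := by
      simp only [pvStep, hbox, htk, hmin, Option.getD_some]
    rw [Function.iterate_succ_apply, hstep]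
    have hplen : (t.take (t.length - mn)).length = t.length - mn := by
      rw [List.length_take]; omega
    have hps : List.Pairwise (· ≤ ·) (t.take (t.length - mn)) :=
      List.Pairwise.sublist (List.take_sublist _ _) hsorted
    have hcm2 : c * mn ≤ (t.take (t.length - mn)).length := by rw [hplen]; omega
    rw [ih (t.take (t.length - mn)) _ hps hcm2]
    have hmapeq : ((List.range c).map
          (fun j => ((t.take (t.length - mn)).getD ((t.take (t.length - mn)).length - (j+1)*mn) 0 : Int)))
        = (List.range c).map (fun j => (t.getD (t.length - (j+2)*mn) 0 : Int)) := by
      apply List.map_congr_left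
      intro j hj
      rw [List.mem_range] at hj
      have hjm : (j+1) * mn ≤ c * mn := Nat.mul_le_mul_right mn (by omega)
      have hlt : (t.take (t.length - mn)).length - (j+1)*mn < t.length - mn := by
        rw [hplen]
        have : 0 < (j+1) * mn := by positivity
        omega
      rw [List.getD_eq_getElem?_getD, List.getElem?_take_of_lt hlt, ← List.getD_eq_getElem?_getD]
      congr 1
      rw [hplen, Nat.sub_sub]
      congr 1
      ring
    rw [hmapeq, List.range_succ_eq_map, List.map_cons, List.sum_cons, List.map_map]
    have hf0 : (t.getD (t.length - (0+1)*mn) 0 : Int) = t[t.length - mn] := by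
      simp only [Nat.zero_add, Nat.one_mul]
      rw [List.getD_eq_getElem?_getD, List.getElem?_eq_getElem hidx]
      rfl
    have hfs : ((List.range c).map ((fun j => (t.getD (t.length - (j+1)*mn) 0 : Int)) ∘ Nat.succ))
        = (List.range c).map (fun j => (t.getD (t.length - (j+2)*mn) 0 : Int)) := by
      apply List.map_congr_left
      intro j _
      rfl
    rw [hf0, hfs]
    ring

-- sorted descending is the reverse of sorted ascending (Int values)
theorem pvDescRev (score : List Int) :
    PySem.List.sorted score (fun x => x) true = (PySem.List.sorted score (fun x => x) false).reverse := by
  apply PySem.List.eq_of_perm_of_pairwise_le_of_injective (fun x : Int => -x) neg_injective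
  · exact (PySem.List.sorted_perm score _ true).trans
      ((PySem.List.sorted_perm score _ false).symm.trans (List.reverse_perm _).symm)
  · have h := PySem.List.sorted_pairwise_rev score (fun x : Int => x)
    exact h.imp (by intro a b hab; simpa using hab)
  · rw [List.pairwise_reverse]
    have h := PySem.List.sorted_pairwise score (fun x : Int => x)
    exact h.imp (by intro a b hab; simpa using hab)

-- B's strided fold equals the common sum
theorem pvSumB (mn : Nat) (hmn : 0 < mn) (t : List Int) (c : Nat) (hc : c * mn ≤ t.length) :
    (PySem.List.pyRange 1 ((c : Int) + 1) 1).foldl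
      (fun acc j => acc + (PySem.List.pyGet? t.reverse (j * (mn:Int) - 1)).getD 0) 0
    = ((List.range c).map (fun j => (t.getD (t.length - (j+1)*mn) 0 : Int))).sum := by
  rw [PySem.List.pyRange_one]
  have hcc : ((c:Int) + 1 - 1).toNat = c := by omega
  rw [hcc, List.foldl_map, PySem.List.foldl_add, zero_add]
  congr 1
  apply List.map_congr_left
  intro j hj
  rw [List.mem_range] at hj
  have hjm : (j+1) * mn ≤ c * mn := Nat.mul_le_mul_right mn (by omega)
  have h1 : 1 ≤ (j+1) * mn := Nat.one_le_iff_ne_zero.mpr (by positivity)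
  have hK : ((1 + (j:Int)) * (mn:Int) - 1) = (((j+1) * mn - 1 : Nat) : Int) := by
    rw [Nat.cast_sub h1]
    push_cast
    ring
  rw [hK, PySem.List.pyGet?_natCast]
  have hlt : (j+1) * mn - 1 < t.length := by omega
  rw [List.getElem?_reverse hlt, List.getD_eq_getElem?_getD]
  have hix : t.length - 1 - ((j+1)*mn - 1) = t.length - (j+1)*mn := by omega
  rw [hix]

-- ===== VERDICT (by name: the statement is the Claim_ definition above) =====
theorem solution_spec : Claim_equal_solution := by
  unfold Claim_equal_solution
  intro k m score _ hm
  unfold Pre_solution at hm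
  simp only [Spec_solution, solution_alt]
  rcases lt_or_gt_of_ne hm with hneg | hpos
  · -- m < 0: both loops are over an empty range
    have hc : PySem.Int.floordiv ((score.length : Int)) m ≤ 0 := by
      unfold PySem.Int.floordiv
      exact pvFdivNonpos _ _ (by positivity) hneg
    simp only [solution, PySem.List.length_sorted]
    rw [PySem.List.pyRange_one_eq_nil hc, PySem.List.pyRange_one_eq_nil (by omega)]
    simp
  · -- m > 0
    obtain ⟨mn, rfl⟩ : ∃ mn : Nat, m = (mn : Int) := ⟨m.toNat, (Int.toNat_of_nonneg hpos.le).symm⟩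
    have hmn : 0 < mn := by exact_mod_cast hpos
    have hLs : (PySem.List.sorted score (fun x : Int => x) false).length = score.length :=
      PySem.List.length_sorted score _ false
    have hfd : PySem.Int.floordiv ((score.length : Int)) (mn : Int) = ((score.length / mn : Nat) : Int) :=
      PySem.Int.floordiv_natCast score.length mn
    have hsp : List.Pairwise (· ≤ ·) (PySem.List.sorted score (fun x : Int => x) false) :=
      (PySem.List.sorted_pairwise score (fun x : Int => x)).imp (by intro a b hab; simpa using hab)
    have hbound : (score.length / mn) * mn ≤ (PySem.List.sorted score (fun x : Int => x) false).length := by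
      rw [hLs]; exact Nat.div_mul_le_self _ _
    have htn : (((score.length / mn : Nat) : Int)).toNat = score.length / mn := Int.toNat_natCast _
    rw [pvSolutionIter, hLs, hfd, htn, pvIterA mn hmn (score.length / mn) _ 0 hsp hbound]
    rw [pvDescRev, pvSumB mn hmn _ (score.length / mn) hbound]
    ring
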